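-- pv_equiv track=rewrite | github.com/mhuber161/mhuber-puzzles | euler/euler18.py | setupMatrix
-- ===== SOURCE A (Python) =====
-- def setupMatrix(triString, size):
--     matrix = [[]]*size
--     offset = 0
--     for i in range(size):     #add ith row to matrix
--         row = []
--         if i != 0: offset += 3
--
--         for j in range(i+1):
--             if j != 0: offset += 3
--             row.append( int(triString[offset]+triString[offset+1]) )
--
--         matrix[i] = row
--
--     return matrix
-- ===== SOURCE B (Python) =====
-- def setupMatrix(triString, size):
--     if size <= 0:
--         return []
--     total = size * (size + 1) // 2
--     nums = [int(triString[3 * k] + triString[3 * k + 1]) for k in range(total)]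
--     rows = []
--     idx = 0
--     for i in range(size):
--         rows.append(nums[idx:idx + i + 1])
--         idx += i + 1
--     return rows
-- ===== Notes on version B (the rewrite author's own statement) =====
-- stated objective: alternative
-- what changed: Replaces A's nested loops with a threaded offset accumulator and in-place matrix[i] assignment by a flat one-pass extraction of all size*(size+1)//2 numbers at stride-3 positions followed by a slicing reshape into triangle rows.
import Mathlib
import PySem

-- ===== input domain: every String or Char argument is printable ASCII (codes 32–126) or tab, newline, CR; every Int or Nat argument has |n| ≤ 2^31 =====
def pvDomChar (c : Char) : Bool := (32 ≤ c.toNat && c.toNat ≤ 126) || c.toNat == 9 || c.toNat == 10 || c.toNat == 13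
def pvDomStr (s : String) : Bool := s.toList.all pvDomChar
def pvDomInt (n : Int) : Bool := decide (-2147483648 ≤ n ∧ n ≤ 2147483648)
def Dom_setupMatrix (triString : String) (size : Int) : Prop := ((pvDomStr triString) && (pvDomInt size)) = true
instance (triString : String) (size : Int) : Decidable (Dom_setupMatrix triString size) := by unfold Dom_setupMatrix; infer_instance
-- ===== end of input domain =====

-- B replaces A's nested loops with a threaded offset accumulator by a flat
-- one-pass extraction of all numbers followed by a slicing reshape (alternative
-- decomposition, same asymptotic cost).

-- ===== PORT A =====
-- inner loop body: 'if j != 0: offset += 3; row.append(int(triString[offset]+triString[offset+1]))'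
def stepInnerA (s : String) (st : List Int × Int) (j : Int) : List Int × Int :=
  let offset := if j ≠ 0 then st.2 + 3 else st.2
  let c1 := (PySem.Str.pyGet? s offset).getD ' '
  let c2 := (PySem.Str.pyGet? s (offset + 1)).getD ' '
  (st.1 ++ [(PySem.Int.ofStr? (String.ofList [c1, c2])).getD 0], offset)

-- 'for j in range(i+1): …' starting from row = []
def innerA (s : String) (i : Int) (offset : Int) : List Int × Int :=
  (PySem.List.pyRange 0 (i + 1) 1).foldl (stepInnerA s) ([], offset)

-- outer loop body: 'if i != 0: offset += 3; <inner loop>; matrix[i] = row'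
def stepOuterA (s : String) (st : List (List Int) × Int) (i : Int) : List (List Int) × Int :=
  let offset := if i ≠ 0 then st.2 + 3 else st.2
  let r := innerA s i offset
  (st.1.set i.toNat r.1, r.2)

def setupMatrix (triString : String) (size : Int) : List (List Int) :=
  ((PySem.List.pyRange 0 size 1).foldl (stepOuterA triString)
    (List.replicate size.toNat [], 0)).1

-- ===== PORT B =====
-- 'rows.append(nums[idx:idx+i+1]); idx += i + 1'
def stepRowB (nums : List Int) (st : List (List Int) × Int) (i : Int) : List (List Int) × Int :=
  (st.1 ++ [PySem.List.slice nums (some st.2) (some (st.2 + i + 1))], st.2 + i + 1)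

def setupMatrix_alt (triString : String) (size : Int) : List (List Int) :=
  if size ≤ 0 then []
  else
    let total := PySem.Int.floordiv (size * (size + 1)) 2
    let nums := (PySem.List.pyRange 0 total 1).map (fun k =>
      (PySem.Int.ofStr? (String.ofList
        [(PySem.Str.pyGet? triString (3 * k)).getD ' ',
         (PySem.Str.pyGet? triString (3 * k + 1)).getD ' '])).getD 0)
    ((PySem.List.pyRange 0 size 1).foldl (stepRowB nums) ([], 0)).1

-- ===== PRECONDITION & SPEC =====
-- the two-character string A reads for the k-th triangle entry, if in range
def pvNumAt? (s : String) (k : Nat) : Option Int :=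
  match s.toList.drop (3 * k) with
  | c1 :: c2 :: _ => PySem.Int.ofStr? (String.ofList [c1, c2])
  | _ => none

-- Pre_ excludes exactly the inputs where Python A raises: some of the
-- size*(size+1)/2 stride-3 reads is out of range (IndexError) or its two
-- characters do not parse as an int (ValueError).
def Pre_setupMatrix (triString : String) (size : Int) : Prop :=
  0 < size →
    ((size * (size + 1)) / 2).toNat ≤ (triString.length + 1) / 3 ∧
    ∀ k < min ((size * (size + 1)) / 2).toNat ((triString.length + 1) / 3),
      (pvNumAt? triString k).isSome = true
instance (triString : String) (size : Int) : Decidable (Pre_setupMatrix triString size) := by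
  unfold Pre_setupMatrix; infer_instance

def pvWitness_setupMatrix : String × Int := ("75\n95 64\n17 47 82", 3)

def Spec_setupMatrix (triString : String) (size : Int) (out : List (List Int)) : Prop := out = setupMatrix_alt triString size
instance (triString : String) (size : Int) (out : List (List Int)) : Decidable (Spec_setupMatrix triString size out) := by unfold Spec_setupMatrix; infer_instance

-- ===== CLAIM (what is proved, stated in full; the proofs are below) =====
def Claim_equal_setupMatrix : Prop := ∀ (triString : String) (size : Int), Dom_setupMatrix triString size → Pre_setupMatrix triString size → Spec_setupMatrix triString size (setupMatrix triString size)

-- ===== LEMMAS AND PROOFS =====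
-- the number A/B parse at character offset m (with harmless defaults)
def numAt (s : String) (m : Int) : Int :=
  (PySem.Int.ofStr? (String.ofList
    [(PySem.Str.pyGet? s m).getD ' ', (PySem.Str.pyGet? s (m + 1)).getD ' '])).getD 0

-- triangular number
def tri (i : Nat) : Nat := i * (i + 1) / 2

-- the intended i-th row
def rowF (s : String) (i : Nat) : List Int :=
  (List.range (i + 1)).map (fun (j : Nat) => numAt s (3 * (tri i : Int) + 3 * (j : Int)))

theorem tri_succ (i : Nat) : tri (i + 1) = tri i + (i + 1) := by
  unfold tri
  have h2 : (i + 1) * (i + 1 + 1) = i * (i + 1) + 2 * (i + 1) := by ring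
  have h3 : i * (i + 1) % 2 = 0 := Nat.even_iff.mp (Nat.even_mul_succ_self i)
  omega


theorem set_append_len {α : Type} (P L : List α) (x : α) :
    (P ++ L).set P.length x = P ++ L.set 0 x := by
  induction P with
  | nil => simp
  | cons a P ih => simp [ih]

theorem innerA_pos (s : String) (t : Nat) : ∀ (a off : Int) (row : List Int), 1 ≤ a →
    (PySem.List.pyRange a (a + t) 1).foldl (stepInnerA s) (row, off)
      = (row ++ (List.range t).map (fun (u : Nat) => numAt s (off + 3 * ((u : Int) + 1))), off + 3 * t) := by
  induction t with
  | zero =>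
    intro a off row _
    rw [PySem.List.pyRange_one_eq_nil (by omega)]
    simp
  | succ t ih =>
    intro a off row ha
    rw [PySem.List.pyRange_one_cons (by push_cast; omega)]
    have hstep : stepInnerA s (row, off) a
        = (row ++ [numAt s (off + 3)], off + 3) := by
      simp [stepInnerA, numAt, if_pos (by omega : a ≠ 0)]
    have hr : a + ((t + 1 : Nat) : Int) = (a + 1) + (t : Int) := by push_cast; ring
    rw [List.foldl_cons, hstep, hr, ih (a + 1) (off + 3) _ (by omega)]
    simp only [Prod.mk.injEq]
    refine ⟨?_, by omega⟩
    rw [List.range_succ_eq_map]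
    simp only [List.map_cons, List.map_map, Function.comp_def, List.append_assoc,
      List.singleton_append, Nat.cast_zero]
    refine congrArg (fun l => row ++ l) ?_
    refine List.cons_eq_cons.mpr ⟨congrArg (numAt s) (by ring), ?_⟩
    apply List.map_congr_left; intro u _
    exact congrArg (numAt s) (by push_cast; ring)

theorem innerA_eq (s : String) (i : Nat) (off : Int) :
    innerA s (i : Int) off
      = ((List.range (i + 1)).map (fun (j : Nat) => numAt s (off + 3 * (j : Int))), off + 3 * i) := by
  unfold innerA
  rw [PySem.List.pyRange_one_cons (by omega : (0:Int) < (i:Int) + 1)]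
  have hstep : stepInnerA s ([], off) 0 = ([numAt s off], off) := by
    simp [stepInnerA, numAt]
  have hr2 : (i : Int) + 1 = (0 + 1) + (i : Int) := by ring
  rw [List.foldl_cons, hstep, hr2, innerA_pos s i (0+1) off _ (by omega)]
  simp only [Prod.mk.injEq]
  refine ⟨?_, by push_cast; try ring⟩
  rw [List.range_succ_eq_map]
  simp only [List.map_cons, List.map_map, Function.comp_def, Nat.cast_zero,
    List.singleton_append]
  refine List.cons_eq_cons.mpr ⟨congrArg (numAt s) (by ring), ?_⟩
  apply List.map_congr_left; intro u _
  exact congrArg (numAt s) (by push_cast; ring)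

theorem outerA_pos (s : String) (t : Nat) : ∀ (a : Nat), 1 ≤ a → ∀ (P : List (List Int)), P.length = a →
    (PySem.List.pyRange (a : Int) ((a : Int) + t) 1).foldl (stepOuterA s)
        (P ++ List.replicate t ([] : List Int), 3 * (tri a : Int) - 3)
      = (P ++ (List.range t).map (fun (u : Nat) => rowF s (a + u)), 3 * (tri (a + t) : Int) - 3) := by
  induction t with
  | zero =>
    intro a _ P _
    rw [PySem.List.pyRange_one_eq_nil (by omega)]
    simp
  | succ t ih =>
    intro a ha P hP
    rw [PySem.List.pyRange_one_cons (by push_cast; omega)]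
    have hstep : stepOuterA s (P ++ List.replicate (t + 1) ([] : List Int), 3 * (tri a : Int) - 3) (a : Int)
        = ((P ++ [rowF s a]) ++ List.replicate t ([] : List Int), 3 * (tri (a + 1) : Int) - 3) := by
      have hne : ((a : Int) ≠ 0) := by omega
      have hoff : 3 * (tri a : Int) - 3 + 3 = 3 * (tri a : Int) := by ring
      simp only [stepOuterA, if_pos hne, hoff, innerA_eq s a (3 * (tri a : Int))]
      have hrow : (List.range (a + 1)).map (fun (j : Nat) => numAt s (3 * (tri a : Int) + 3 * (j : Int))) = rowF s a := by
        unfold rowF; rfl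
      have hset : (P ++ List.replicate (t + 1) ([] : List Int)).set ((a : Int)).toNat (rowF s a)
          = (P ++ [rowF s a]) ++ List.replicate t ([] : List Int) := by
        have he : ((a : Int)).toNat = P.length := by omega
        rw [he, set_append_len]
        simp [List.replicate_succ]
      simp only [hrow, hset, Prod.mk.injEq, true_and]
      rw [tri_succ]; push_cast; ring
    have hr : (a : Int) + ((t + 1 : Nat) : Int) = ((a : Int) + 1) + (t : Int) := by push_cast; ring
    have hc : ((a : Int) + 1) = ((a + 1 : Nat) : Int) := by push_cast; ring
    rw [List.foldl_cons, hstep, hr, hc,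
      ih (a + 1) (by omega) (P ++ [rowF s a]) (by simp [hP])]
    simp only [Prod.mk.injEq]
    constructor
    · rw [List.range_succ_eq_map]
      simp only [List.map_cons, List.map_map, Function.comp_def, List.append_assoc,
        List.singleton_append, Nat.add_zero, Nat.succ_eq_add_one]
      refine congrArg (fun l => P ++ l) ?_
      refine List.cons_eq_cons.mpr ⟨rfl, ?_⟩
      apply List.map_congr_left; intro u _
      exact congrArg (rowF s) (by omega)
    · rw [show (a + 1) + t = a + (t + 1) from by omega]

theorem reshapeB (nums : List Int) (t : Nat) : ∀ (a : Nat) (R : List (List Int)),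
    (PySem.List.pyRange (a : Int) ((a : Int) + t) 1).foldl (stepRowB nums) (R, (tri a : Int))
      = (R ++ (List.range t).map (fun (u : Nat) =>
          PySem.List.slice nums (some ((tri (a + u) : Nat) : Int)) (some ((tri (a + u) + (a + u) + 1 : Nat) : Int))),
         (tri (a + t) : Int)) := by
  induction t with
  | zero =>
    intro a R
    rw [PySem.List.pyRange_one_eq_nil (by omega)]
    simp
  | succ t ih =>
    intro a R
    rw [PySem.List.pyRange_one_cons (by push_cast; omega)]
    have harg : (tri a : Int) + (a : Int) + 1 = ((tri a + a + 1 : Nat) : Int) := by push_cast; ring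
    have hstep : stepRowB nums (R, (tri a : Int)) (a : Int)
        = (R ++ [PySem.List.slice nums (some ((tri a : Nat) : Int)) (some ((tri a + a + 1 : Nat) : Int))],
           (tri (a + 1) : Int)) := by
      simp only [stepRowB, Prod.mk.injEq]
      refine ⟨by rw [harg], by rw [harg, tri_succ]; push_cast; ring⟩
    have hr : (a : Int) + ((t + 1 : Nat) : Int) = ((a : Int) + 1) + (t : Int) := by push_cast; ring
    have hc : ((a : Int) + 1) = ((a + 1 : Nat) : Int) := by push_cast; ring
    rw [List.foldl_cons, hstep, hr, hc, ih (a + 1)]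
    simp only [Prod.mk.injEq]
    constructor
    · rw [List.range_succ_eq_map]
      simp only [List.map_cons, List.map_map, Function.comp_def, List.append_assoc,
        List.singleton_append, Nat.add_zero, Nat.succ_eq_add_one]
      refine congrArg (fun l => R ++ l) ?_
      refine List.cons_eq_cons.mpr ⟨rfl, ?_⟩
      apply List.map_congr_left; intro u _
      rw [show (a + 1) + u = a + (u + 1) from by omega]
    · rw [show (a + 1) + t = a + (t + 1) from by omega]

theorem tri_mono {a b : Nat} (h : a ≤ b) : tri a ≤ tri b :=
  Nat.div_le_div_right (Nat.mul_le_mul h (by omega))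

theorem rowF_zero (s : String) : rowF s 0 = [numAt s 0] := by
  simp [rowF, tri]

theorem setupMatrix_eq (s : String) (size : Int) :
    setupMatrix s size = (List.range size.toNat).map (rowF s) := by
  unfold setupMatrix
  by_cases h : size ≤ 0
  · rw [PySem.List.pyRange_one_eq_nil h]
    simp [Int.toNat_of_nonpos h]
  · push Not at h
    obtain ⟨n, rfl⟩ : ∃ n : Nat, size = (n : Int) := ⟨size.toNat, by omega⟩
    obtain ⟨m, rfl⟩ : ∃ m : Nat, n = m + 1 := ⟨n - 1, by omega⟩
    rw [PySem.List.pyRange_one_cons (by omega : (0 : Int) < ((m + 1 : Nat) : Int))]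
    have hin : innerA s (0 : Int) 0 = ([numAt s 0], 0) := by
      have := innerA_eq s 0 0
      simpa using this
    have hstep : stepOuterA s (List.replicate (((m + 1 : Nat) : Int)).toNat ([] : List Int), 0) 0
        = (rowF s 0 :: List.replicate m ([] : List Int), 0) := by
      simp only [stepOuterA, if_neg (by omega : ¬ ((0 : Int) ≠ 0)), hin]
      rw [show (((m + 1 : Nat) : Int)).toNat = m + 1 from by omega, List.replicate_succ]
      simp [rowF_zero]
    have hr : (0 : Int) + 1 = ((1 : Nat) : Int) := by norm_num
    have hr2 : ((m + 1 : Nat) : Int) = ((1 : Nat) : Int) + (m : Int) := by push_cast; ring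
    have hoff : (0 : Int) = 3 * ((tri 1 : Nat) : Int) - 3 := by norm_num [tri]
    have hP : (rowF s 0 :: List.replicate m ([] : List Int))
        = [rowF s 0] ++ List.replicate m ([] : List Int) := rfl
    rw [List.foldl_cons, hstep, hr, hr2, hP, hoff,
      outerA_pos s m 1 (by omega) [rowF s 0] rfl]
    rw [show (((1 : Nat) : Int) + (m : Int)).toNat = m + 1 from by omega, List.range_succ_eq_map]
    simp only [List.map_cons, List.map_map, Function.comp_def, List.singleton_append,
      Nat.succ_eq_add_one]
    refine List.cons_eq_cons.mpr ⟨rfl, ?_⟩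
    apply List.map_congr_left; intro u _
    exact congrArg (rowF s) (by omega)

theorem setupMatrix_alt_eq (s : String) (size : Int) :
    setupMatrix_alt s size = (List.range size.toNat).map (rowF s) := by
  by_cases h : size ≤ 0
  · simp only [setupMatrix_alt, if_pos h]
    simp [Int.toNat_of_nonpos h]
  · simp only [setupMatrix_alt, if_neg h]
    push Not at h
    obtain ⟨n, rfl⟩ : ∃ n : Nat, size = (n : Int) := ⟨size.toNat, by omega⟩
    have htot : PySem.Int.floordiv ((n : Int) * ((n : Int) + 1)) 2 = ((tri n : Nat) : Int) := by
      rw [show (n : Int) * ((n : Int) + 1) = ((n * (n + 1) : Nat) : Int) from by push_cast; ring,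
        show (2 : Int) = ((2 : Nat) : Int) from rfl, PySem.Int.floordiv_natCast]
      rfl
    rw [htot]
    have hnums : (PySem.List.pyRange 0 ((tri n : Nat) : Int) 1).map (fun k =>
        (PySem.Int.ofStr? (String.ofList
          [(PySem.Str.pyGet? s (3 * k)).getD ' ',
           (PySem.Str.pyGet? s (3 * k + 1)).getD ' '])).getD 0)
        = (List.range (tri n)).map (fun (k : Nat) => numAt s (3 * (k : Int))) := by
      rw [PySem.List.pyRange_one]
      simp only [List.map_map, Function.comp_def, zero_add, Int.sub_zero, Int.toNat_natCast]
      rfl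
    rw [hnums]
    have hRB := reshapeB ((List.range (tri n)).map (fun (k : Nat) => numAt s (3 * (k : Int)))) n 0 []
    rw [show ((0 : Nat) : Int) = (0 : Int) from rfl,
      show (0 : Int) + (n : Int) = (n : Int) from by ring,
      show ((tri 0 : Nat) : Int) = (0 : Int) from by norm_num [tri]] at hRB
    rw [hRB]
    rw [show ((n : Nat) : Int).toNat = n from by omega]
    simp only [List.nil_append, Nat.zero_add]
    apply List.map_congr_left; intro u hu
    have hu' : u < n := List.mem_range.mp hu
    have hle : tri u + u + 1 ≤ tri n := by
      have h1 : tri (u + 1) ≤ tri n := tri_mono (by omega)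
      rw [tri_succ] at h1; omega
    rw [PySem.List.slice_natCast]
    rw [show tri u + u + 1 - tri u = u + 1 from by omega]
    rw [← List.map_drop, ← List.map_take]
    unfold rowF
    apply List.ext_getElem
    · simp only [List.length_map, List.length_take, List.length_drop, List.length_range]
      omega
    · intro j h1 h2
      simp only [List.getElem_map, List.getElem_take, List.getElem_drop, List.getElem_range]
      exact congrArg (numAt s) (by push_cast; ring)

-- ===== VERDICT (by name: the statement is the Claim_ definition above) =====
theorem setupMatrix_spec : Claim_equal_setupMatrix := by
  intro s size _ _
  unfold Spec_setupMatrix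
  rw [setupMatrix_eq, setupMatrix_alt_eq]
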